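-- pv_equiv track=rewrite | github.com/gayathriev/fuzzer | modes/txt_fuzzer.py | large_negatives
-- ===== SOURCE A (Python) =====
-- import copy
--
-- def large_negatives(sample_txt, perm_inputs):
--     # Generate small numbers '32' for intruction size
--     for i in range(0, 32):
--         mutated_copy = copy.deepcopy(sample_txt)
--         y = str(-(2 ** i))
--         for line in range(len(mutated_copy)):
--             mutated_copy = copy.deepcopy(sample_txt)
--             mutated_copy[line] = y + '\n'
--             perm_inputs.append("".join(mutated_copy))
--     return perm_inputs
-- ===== SOURCE B (Python) =====
-- def large_negatives(sample_txt, perm_inputs):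
--     # Precompute prefix joins P[l] = ''.join(sample_txt[:l]) and
--     # suffix joins S[l] = ''.join(sample_txt[l:]) once, then emit each
--     # mutation as P[line] + y + '\n' + S[line + 1] -- no per-mutation
--     # deepcopy or re-join of the whole list.
--     n = len(sample_txt)
--     P = [''] * (n + 1)
--     for l in range(n):
--         P[l + 1] = P[l] + sample_txt[l]
--     S = [''] * (n + 1)
--     for l in range(n - 1, -1, -1):
--         S[l] = sample_txt[l] + S[l + 1]
--     for i in range(32):
--         y = str(-(2 ** i))
--         for line in range(n):
--             perm_inputs.append(P[line] + y + '\n' + S[line + 1])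
--     return perm_inputs
-- ===== Notes on version B (the rewrite author's own statement) =====
-- stated objective: faster
-- what changed: B precomputes prefix-join and suffix-join tables in two linear passes and assembles each mutated text from three fragments, eliminating A's per-mutation deepcopy and full ''.join over the whole list.
import Mathlib
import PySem

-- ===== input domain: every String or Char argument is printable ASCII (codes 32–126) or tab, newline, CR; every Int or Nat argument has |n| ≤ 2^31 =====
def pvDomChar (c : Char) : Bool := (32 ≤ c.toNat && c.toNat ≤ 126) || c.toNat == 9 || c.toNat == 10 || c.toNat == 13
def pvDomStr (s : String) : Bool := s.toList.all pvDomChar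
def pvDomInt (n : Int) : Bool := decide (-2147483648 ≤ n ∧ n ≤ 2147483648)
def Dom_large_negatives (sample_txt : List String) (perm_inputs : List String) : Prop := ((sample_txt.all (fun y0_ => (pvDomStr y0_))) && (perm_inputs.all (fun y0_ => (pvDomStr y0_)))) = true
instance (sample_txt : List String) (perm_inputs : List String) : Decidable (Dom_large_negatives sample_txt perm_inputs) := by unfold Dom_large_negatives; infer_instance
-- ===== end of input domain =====

-- B replaces A's per-mutation deepcopy + full join with precomputed prefix/suffix join tables (objective: faster by a constant-factor mechanism); A mutates perm_inputs in place and B performs the same mutation.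


-- ===== PORT A =====
-- copy.deepcopy of a list of strings is the identity on the value (Lean lists are pure);
-- 'line' ranges over range(len(..)), so it is nonnegative and list assignment is List.set at line.toNat (exact).
def large_negatives (sample_txt : List String) (perm_inputs : List String) : List String :=
  (PySem.List.pyRange 0 32 1).foldl (fun acc i =>
    let y := PySem.Int.toStr (-(2 ^ i.toNat))
    (PySem.List.pyRange 0 (sample_txt.length : Int) 1).foldl (fun acc2 line =>
      let mutated_copy := sample_txt.set line.toNat (y ++ "\n")
      acc2 ++ [PySem.Str.join "" mutated_copy]) acc) perm_inputs

-- ===== PORT B =====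
-- prefix table: pvBuildPrefix acc xs = [acc, acc++xs[0], acc++xs[0]+xs[1], …] (Source B's P loop)
def pvBuildPrefix (acc : String) : List String → List String
  | [] => [acc]
  | s :: rest => acc :: pvBuildPrefix (acc ++ s) rest

-- suffix table: pvBuildSuffix xs = [join xs, join xs[1:], …, ""] (Source B's S countdown loop)
def pvBuildSuffix : List String → List String
  | [] => [""]
  | s :: rest =>
    let t := pvBuildSuffix rest
    (s ++ t.getD 0 "") :: t

def large_negatives_alt (sample_txt : List String) (perm_inputs : List String) : List String :=
  let P := pvBuildPrefix "" sample_txt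
  let S := pvBuildSuffix sample_txt
  (PySem.List.pyRange 0 32 1).foldl (fun acc i =>
    let y := PySem.Int.toStr (-(2 ^ i.toNat))
    (PySem.List.pyRange 0 (sample_txt.length : Int) 1).foldl (fun acc2 line =>
      acc2 ++ [PySem.List.pyGetD P line "" ++ y ++ "\n" ++ PySem.List.pyGetD S (line + 1) ""]) acc) perm_inputs

-- ===== PRECONDITION & SPEC =====
def Spec_large_negatives (sample_txt : List String) (perm_inputs : List String) (out : List String) : Prop := out = large_negatives_alt sample_txt perm_inputs
instance (sample_txt : List String) (perm_inputs : List String) (out : List String) : Decidable (Spec_large_negatives sample_txt perm_inputs out) := by unfold Spec_large_negatives; infer_instance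

-- ===== CLAIM (what is proved, stated in full; the proofs are below) =====
def Claim_equal_large_negatives : Prop := ∀ (sample_txt : List String) (perm_inputs : List String), Dom_large_negatives sample_txt perm_inputs → Spec_large_negatives sample_txt perm_inputs (large_negatives sample_txt perm_inputs)

-- ===== LEMMAS AND PROOFS =====

theorem pvJoinNilSep (l : List (List Char)) : PySem.Chars.join [] l = l.flatten := by
  induction l with
  | nil => rfl
  | cons a t ih =>
    cases t with
    | nil => simp [PySem.Chars.join, List.intercalate]
    | cons b r =>
      rw [PySem.Chars.join_cons_cons]
      rw [ih]
      simp

theorem pvJoinCons (a : String) (l : List String) :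
    PySem.Str.join "" (a :: l) = a ++ PySem.Str.join "" l := by
  apply String.toList_inj.mp
  simp [PySem.Str.toList_join, pvJoinNilSep]

theorem pvJoinNil : PySem.Str.join "" ([] : List String) = "" := rfl

theorem pvJoinAppend (l₁ l₂ : List String) :
    PySem.Str.join "" (l₁ ++ l₂) = PySem.Str.join "" l₁ ++ PySem.Str.join "" l₂ := by
  induction l₁ with
  | nil => simp [pvJoinNil]
  | cons a t ih => simp [pvJoinCons, ih, String.append_assoc]

theorem pvPrefixGetD (xs : List String) (acc : String) (k : Nat) (hk : k ≤ xs.length) :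
    (pvBuildPrefix acc xs).getD k "" = acc ++ PySem.Str.join "" (xs.take k) := by
  induction xs generalizing acc k with
  | nil =>
    have hk0 : k = 0 := by simpa using hk
    subst hk0
    simp [pvBuildPrefix, pvJoinNil]
  | cons s rest ih =>
    cases k with
    | zero => simp [pvBuildPrefix, pvJoinNil]
    | succ k =>
      simp only [pvBuildPrefix, List.getD_cons_succ, List.take_succ_cons, pvJoinCons]
      rw [ih (acc ++ s) k (by simpa using Nat.succ_le_succ_iff.mp hk)]
      simp [String.append_assoc]

theorem pvSuffixGetD (xs : List String) (k : Nat) :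
    (pvBuildSuffix xs).getD k "" = PySem.Str.join "" (xs.drop k) := by
  induction xs generalizing k with
  | nil => cases k <;> simp [pvBuildSuffix, pvJoinNil]
  | cons s rest ih =>
    cases k with
    | zero =>
      have hh : (pvBuildSuffix rest).getD 0 "" = PySem.Str.join "" rest := by
        simpa using ih 0
      simp only [pvBuildSuffix, List.getD_cons_zero, List.drop_zero, hh, pvJoinCons]
    | succ k =>
      simp only [pvBuildSuffix, List.getD_cons_succ, List.drop_succ_cons]
      exact ih k

theorem pvJoinSet (xs : List String) (r : String) (k : Nat) (hk : k < xs.length) :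
    PySem.Str.join "" (xs.set k r) =
      PySem.Str.join "" (xs.take k) ++ (r ++ PySem.Str.join "" (xs.drop (k + 1))) := by
  rw [List.set_eq_take_append_cons_drop, if_pos hk, pvJoinAppend, pvJoinCons]

theorem large_negatives_spec : Claim_equal_large_negatives := by
  intro sample_txt perm_inputs _
  unfold Spec_large_negatives large_negatives large_negatives_alt
  apply PySem.List.foldl_congr_mem
  intro acc i _
  apply PySem.List.foldl_congr_mem
  intro acc2 line hline
  obtain ⟨h0, hn⟩ := (PySem.List.mem_pyRange_one).mp hline
  have hlt : line.toNat < sample_txt.length := by omega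
  show acc2 ++ [PySem.Str.join "" (sample_txt.set line.toNat (PySem.Int.toStr (-2 ^ i.toNat) ++ "\n"))] = _
  congr 1
  rw [PySem.List.pyGetD_of_nonneg _ _ h0, PySem.List.pyGetD_of_nonneg _ _ (by omega : (0:Int) ≤ line + 1)]
  have h1 : ((line + 1 : Int)).toNat = line.toNat + 1 := by omega
  rw [h1, pvPrefixGetD _ _ _ (le_of_lt hlt), pvSuffixGetD]
  rw [pvJoinSet _ _ _ hlt]
  simp [String.append_assoc]
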